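-- pv_equiv track=rewrite | github.com/jingshibo/PythonProject | Bipolar_EMG/Models/Dataset_Model.py | selectInput
-- ===== SOURCE A (Python) =====
-- def selectInput(data_dict, indices):
--     selected_data = {}
--     for group, sets in data_dict.items():
--         selected_data[group] = {}
--         for set_type, mode_values in sets.items():
--             selected_data[group][set_type] = {}
--             for mode, list_of_windows in mode_values.items():
--                 # Selecting elements from each list based on indices
--                 selected_data[group][set_type][mode] = [[window_features[i] for i in indices if i < len(window_features)] for window_features in list_of_windows]
--     return selected_data
-- ===== SOURCE B (Python) =====
-- def selectInput(data_dict, indices):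
--     # Recursive descent over the nested dict structure; the leaf (first non-dict)
--     # is the list of windows, from which the indexed features are gathered.
--     def _select(node):
--         if isinstance(node, dict):
--             return {k: _select(v) for k, v in node.items()}
--         return [[w[i] for i in indices if i < len(w)] for w in node]
--     return _select(data_dict)
-- ===== Notes on version B (the rewrite author's own statement) =====
-- stated objective: simpler
-- what changed: One recursive helper over the nested dict structure (dict -> recurse on values, non-dict leaf -> gather indexed features) replaces A's three hardcoded mutating loop levels that build the result dict key by key.
import Mathlib
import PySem

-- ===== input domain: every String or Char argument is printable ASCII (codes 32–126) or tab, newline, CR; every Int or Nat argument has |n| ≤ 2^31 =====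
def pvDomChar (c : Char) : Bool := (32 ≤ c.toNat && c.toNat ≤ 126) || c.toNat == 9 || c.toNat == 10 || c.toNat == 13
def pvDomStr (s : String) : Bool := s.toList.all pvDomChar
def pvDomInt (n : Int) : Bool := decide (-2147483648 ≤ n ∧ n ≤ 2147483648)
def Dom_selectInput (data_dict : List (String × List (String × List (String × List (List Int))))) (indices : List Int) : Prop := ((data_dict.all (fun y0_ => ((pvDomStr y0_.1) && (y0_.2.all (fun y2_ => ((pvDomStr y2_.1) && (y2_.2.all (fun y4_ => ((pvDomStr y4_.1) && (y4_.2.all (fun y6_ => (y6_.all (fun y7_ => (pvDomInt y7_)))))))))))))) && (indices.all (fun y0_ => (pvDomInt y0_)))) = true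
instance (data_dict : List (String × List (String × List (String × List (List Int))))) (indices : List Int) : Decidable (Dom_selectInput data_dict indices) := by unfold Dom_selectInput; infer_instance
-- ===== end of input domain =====

-- B replaces A's three hardcoded mutating loop levels with one recursive descent over the
-- nested dict structure (objective: simpler); same leaf comprehension, same results.

-- ===== PORT A =====
-- the comprehension [window_features[i] for i in indices if i < len(window_features)]
-- (shared by both Pythons verbatim); pyGetD is exact under Pre_ (no IndexError inputs admitted)
def pvGather (indices : List Int) (w : List Int) : List Int :=
  indices.foldl (fun acc i => if i < (w.length : Int) then acc ++ [PySem.List.pyGetD w i 0] else acc) []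

-- literal transliteration of A: selected_data is a dict mutated in place
-- (selected_data[group][set_type][mode] = … becomes nested Dict.modify)
def selectInput (data_dict : List (String × List (String × List (String × List (List Int))))) (indices : List Int) : List (String × List (String × List (String × List (List Int)))) :=
  (show PySem.Dict String (PySem.Dict String (PySem.Dict String (List (List Int)))) from
    data_dict.foldl (fun sel gp =>
      let sel := sel.insert gp.1 PySem.Dict.empty
      gp.2.foldl (fun sel sp =>
        let sel := sel.modify gp.1 PySem.Dict.empty (fun gd => gd.insert sp.1 PySem.Dict.empty)
        sp.2.foldl (fun sel mp =>
          sel.modify gp.1 PySem.Dict.empty (fun gd =>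
            gd.modify sp.1 PySem.Dict.empty (fun sd =>
              sd.insert mp.1 (mp.2.map (fun w => pvGather indices w))))) sel) sel)
      PySem.Dict.empty).items.map (fun gp => (gp.1, gp.2.items.map (fun sp => (sp.1, sp.2.items))))

-- ===== PORT B =====
-- port of Source B's _select: the polymorphic recursion unfolds, at this fixed input type,
-- to one map per dict level with the gather comprehension at the leaf
def selectInput_alt (data_dict : List (String × List (String × List (String × List (List Int))))) (indices : List Int) : List (String × List (String × List (String × List (List Int)))) :=
  data_dict.map (fun gp => (gp.1, gp.2.map (fun sp =>
    (sp.1, sp.2.map (fun mp => (mp.1, mp.2.map (fun w => pvGather indices w)))))))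

-- ===== PRECONDITION & SPEC =====
-- Pre_ excludes (a) association lists with duplicate keys at any dict level — a Python dict
-- cannot carry them, so A's overwrite-in-place order there is a representation accident —
-- and (b) indices on which A raises IndexError (a negative i that passes the i < len(w)
-- filter but satisfies i < -len(w)).
def Pre_selectInput (data_dict : List (String × List (String × List (String × List (List Int))))) (indices : List Int) : Prop :=
  (data_dict.map Prod.fst).Nodup ∧
  (∀ gp ∈ data_dict, (gp.2.map Prod.fst).Nodup ∧ ∀ sp ∈ gp.2, (sp.2.map Prod.fst).Nodup) ∧
  (∀ gp ∈ data_dict, ∀ sp ∈ gp.2, ∀ mp ∈ sp.2, ∀ w ∈ mp.2, ∀ i ∈ indices,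
    i < (w.length : Int) → -(w.length : Int) ≤ i)
instance (data_dict : List (String × List (String × List (String × List (List Int))))) (indices : List Int) : Decidable (Pre_selectInput data_dict indices) := by unfold Pre_selectInput; infer_instance

def pvWitness_selectInput : (List (String × List (String × List (String × List (List Int))))) × List Int :=
  ([("a", [("t", [("m", [[1, 2], [3]])])]), ("b", [("u", [("n", [[4, 5, 6]])])])], [0, -1, 7])

def Spec_selectInput (data_dict : List (String × List (String × List (String × List (List Int))))) (indices : List Int) (out : List (String × List (String × List (String × List (List Int))))) : Prop := out = selectInput_alt data_dict indices
instance (data_dict : List (String × List (String × List (String × List (List Int))))) (indices : List Int) (out : List (String × List (String × List (String × List (List Int))))) : Decidable (Spec_selectInput data_dict indices out) := by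
  unfold Spec_selectInput
  letI h1 : DecidableEq (String × List (String × List (List Int))) := instDecidableEqProd
  letI h2 : DecidableEq (List (String × List (String × List (List Int)))) := instDecidableEqList
  letI h3 : DecidableEq (String × List (String × List (String × List (List Int)))) := instDecidableEqProd
  letI h4 : DecidableEq (List (String × List (String × List (String × List (List Int))))) := instDecidableEqList
  exact h4 out (selectInput_alt data_dict indices)

-- ===== CLAIM (what is proved, stated in full; the proofs are below) =====
def Claim_equal_selectInput : Prop := ∀ (data_dict : List (String × List (String × List (String × List (List Int))))) (indices : List Int), Dom_selectInput data_dict indices → Pre_selectInput data_dict indices → Spec_selectInput data_dict indices (selectInput data_dict indices)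

-- ===== LEMMAS AND PROOFS =====

-- canonical (pure) forms of A's three dict-building loops, used only by the proofs
def pvS (idx : List Int) (modes : List (String × List (List Int))) : PySem.Dict String (List (List Int)) :=
  modes.foldl (fun sd mp => sd.insert mp.1 (mp.2.map (fun w => pvGather idx w))) PySem.Dict.empty

def pvG (idx : List Int) (sets : List (String × List (String × List (List Int)))) : PySem.Dict String (PySem.Dict String (List (List Int))) :=
  sets.foldl (fun gd sp => gd.insert sp.1 (pvS idx sp.2)) PySem.Dict.empty

-- modify = insert of the (defaulted) looked-up value, definitionally
theorem pv_modify_eq_insert {κ ν : Type} [BEq κ] (d : PySem.Dict κ ν) (k : κ) (d0 : ν) (f : ν → ν) :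
    d.modify k d0 f = d.insert k (f (d.getD k d0)) := rfl

theorem pv_insert_modify_self {κ ν : Type} [BEq κ] [LawfulBEq κ] (d : PySem.Dict κ ν) (k : κ) (v : ν) (d0 : ν) (f : ν → ν) :
    (d.insert k v).modify k d0 f = d.insert k (f v) := by
  rw [pv_modify_eq_insert, PySem.Dict.getD_insert_self, PySem.Dict.insert_insert_self]

-- the innermost loop (over modes) mutates only the slot at (g, st)
theorem pv_mode_loop (idx : List Int) (g st : String) (modes : List (String × List (List Int)))
    (sel : PySem.Dict String (PySem.Dict String (PySem.Dict String (List (List Int)))))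
    (gd : PySem.Dict String (PySem.Dict String (List (List Int))))
    (sd : PySem.Dict String (List (List Int))) :
    modes.foldl (fun sel mp =>
        sel.modify g PySem.Dict.empty (fun gd =>
          gd.modify st PySem.Dict.empty (fun sd =>
            sd.insert mp.1 (mp.2.map (fun w => pvGather idx w)))))
      (sel.insert g (gd.insert st sd))
    = sel.insert g (gd.insert st
        (modes.foldl (fun sd mp => sd.insert mp.1 (mp.2.map (fun w => pvGather idx w))) sd)) := by
  induction modes generalizing sd with
  | nil => simp only [List.foldl_nil]
  | cons mp rest ih =>
      simp only [List.foldl_cons]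
      rw [pv_insert_modify_self, pv_insert_modify_self, ih]

-- the middle loop (over set types) mutates only the slot at g
theorem pv_set_loop (idx : List Int) (g : String)
    (sets : List (String × List (String × List (List Int))))
    (sel : PySem.Dict String (PySem.Dict String (PySem.Dict String (List (List Int)))))
    (gd : PySem.Dict String (PySem.Dict String (List (List Int)))) :
    sets.foldl (fun sel sp =>
        sp.2.foldl (fun sel mp =>
            sel.modify g PySem.Dict.empty (fun gd =>
              gd.modify sp.1 PySem.Dict.empty (fun sd =>
                sd.insert mp.1 (mp.2.map (fun w => pvGather idx w)))))
          (sel.modify g PySem.Dict.empty (fun gd => gd.insert sp.1 PySem.Dict.empty)))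
      (sel.insert g gd)
    = sel.insert g (sets.foldl (fun gd sp => gd.insert sp.1 (pvS idx sp.2)) gd) := by
  induction sets generalizing gd with
  | nil => simp only [List.foldl_nil]
  | cons sp rest ih =>
      simp only [List.foldl_cons]
      rw [pv_insert_modify_self, pv_mode_loop, ih]
      rfl

-- the outer loop builds the pure nested dict pvG groupwise
theorem pv_group_loop (idx : List Int)
    (d : List (String × List (String × List (String × List (List Int)))))
    (sel : PySem.Dict String (PySem.Dict String (PySem.Dict String (List (List Int))))) :
    d.foldl (fun sel gp =>
        gp.2.foldl (fun sel sp =>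
            sp.2.foldl (fun sel mp =>
                sel.modify gp.1 PySem.Dict.empty (fun gd =>
                  gd.modify sp.1 PySem.Dict.empty (fun sd =>
                    sd.insert mp.1 (mp.2.map (fun w => pvGather idx w)))))
              (sel.modify gp.1 PySem.Dict.empty (fun gd => gd.insert sp.1 PySem.Dict.empty)))
          (sel.insert gp.1 PySem.Dict.empty)) sel
    = d.foldl (fun sel gp => sel.insert gp.1 (pvG idx gp.2)) sel := by
  induction d generalizing sel with
  | nil => rfl
  | cons gp rest ih =>
      simp only [List.foldl_cons]
      rw [pv_set_loop, ih]
      rfl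

-- items of the pure mode-level dict, under unique mode keys
theorem pv_items_S (idx : List Int) (modes : List (String × List (List Int)))
    (hnd : (modes.map Prod.fst).Nodup) :
    (pvS idx modes).items = modes.map (fun mp => (mp.1, mp.2.map (fun w => pvGather idx w))) := by
  unfold pvS
  rw [PySem.Dict.items_foldl_insert_fresh modes Prod.fst
        (fun mp => mp.2.map (fun w => pvGather idx w)) PySem.Dict.empty
        (fun a _ => PySem.Dict.contains_empty _) hnd]
  rfl

-- items of the pure set-level dict, under unique set-type keys
theorem pv_items_G (idx : List Int) (sets : List (String × List (String × List (List Int))))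
    (hnd : (sets.map Prod.fst).Nodup) :
    (pvG idx sets).items = sets.map (fun sp => (sp.1, pvS idx sp.2)) := by
  unfold pvG
  rw [PySem.Dict.items_foldl_insert_fresh sets Prod.fst (fun sp => pvS idx sp.2) PySem.Dict.empty
        (fun a _ => PySem.Dict.contains_empty _) hnd]
  rfl

-- ===== VERDICT (by name: the statement is the Claim_ definition above) =====
theorem selectInput_spec : Claim_equal_selectInput := by
  intro d idx _hdom hpre
  unfold Spec_selectInput selectInput selectInput_alt
  obtain ⟨hnd1, hnd2, _hidx⟩ := hpre
  rw [pv_group_loop]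
  rw [PySem.Dict.items_foldl_insert_fresh d Prod.fst (fun gp => pvG idx gp.2) PySem.Dict.empty
        (fun a _ => PySem.Dict.contains_empty _) hnd1]
  simp only [PySem.Dict.empty, List.nil_append, List.map_map]
  refine List.map_congr_left (fun gp hgp => ?_)
  simp only [Function.comp]
  rw [pv_items_G idx gp.2 (hnd2 gp hgp).1]
  rw [List.map_map]
  refine congrArg (Prod.mk gp.1) ?_
  refine List.map_congr_left (fun sp hsp => ?_)
  simp only [Function.comp]
  rw [pv_items_S idx sp.2 ((hnd2 gp hgp).2 sp hsp)]
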